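-- pv_equiv track=rewrite | github.com/thiagofernandes1987-create/APEX | algorithms/uco-sensor/sensor-api/sensor_core/uco_bridge.py | _remove_dead_code_transform
-- ===== SOURCE A (Python) =====
-- from typing import Optional, List, Dict, Any, Set, Tuple
--
-- def _remove_dead_code_transform(source: str) -> str:
--     """Remove linhas de dead code óbvias via análise de indentação + terminais."""
--     lines = source.split("\n")
--     result_lines: List[str] = []
--     # Simples: detecta blocos onde uma linha terminal é seguida de código no mesmo nível
--     i = 0
--     while i < len(lines):
--         line = lines[i]
--         stripped = line.strip()
--         result_lines.append(line)
--         # Se é um terminal simples (return/raise/break), pular linhas de mesmo nível até próximo bloco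
--         if stripped.startswith(("return ", "return\n", "raise ", "break", "continue")):
--             indent = len(line) - len(line.lstrip())
--             j = i + 1
--             while j < len(lines):
--                 next_line = lines[j]
--                 if not next_line.strip():  # linha vazia — manter
--                     result_lines.append(next_line)
--                     j += 1
--                     continue
--                 next_indent = len(next_line) - len(next_line.lstrip())
--                 if next_indent == indent:
--                     # Mesmo nível → dead code após terminal
--                     j += 1
--                     continue
--                 break
--             i = j
--         else:
--             i += 1
--     return "\n".join(result_lines)
-- ===== SOURCE B (Python) =====
-- def _remove_dead_code_transform(source: str) -> str:
--     """Single flat pass: a 'skipping indent' state replaces A's nested index loops."""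
--     out = []
--     skip_indent = None  # indent level whose trailing same-level lines are dead
--     for line in source.split("\n"):
--         stripped = line.strip()
--         if skip_indent is not None:
--             if not stripped:
--                 out.append(line)  # blank line inside a dead block is kept
--                 continue
--             if len(line) - len(line.lstrip()) == skip_indent:
--                 continue  # dead code after a terminal statement
--             skip_indent = None  # block ended: fall through and process normally
--         out.append(line)
--         if stripped.startswith(("return ", "return\n", "raise ", "break", "continue")):
--             skip_indent = len(line) - len(line.lstrip())
--     return "\n".join(out)
-- ===== Notes on version B (the rewrite author's own statement) =====
-- stated objective: simpler
-- what changed: A's outer index loop with a nested skip-ahead while loop is replaced by one flat pass over the lines carrying an optional skipping-indent state, appending or dropping each line as it is seen.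
import Mathlib
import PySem

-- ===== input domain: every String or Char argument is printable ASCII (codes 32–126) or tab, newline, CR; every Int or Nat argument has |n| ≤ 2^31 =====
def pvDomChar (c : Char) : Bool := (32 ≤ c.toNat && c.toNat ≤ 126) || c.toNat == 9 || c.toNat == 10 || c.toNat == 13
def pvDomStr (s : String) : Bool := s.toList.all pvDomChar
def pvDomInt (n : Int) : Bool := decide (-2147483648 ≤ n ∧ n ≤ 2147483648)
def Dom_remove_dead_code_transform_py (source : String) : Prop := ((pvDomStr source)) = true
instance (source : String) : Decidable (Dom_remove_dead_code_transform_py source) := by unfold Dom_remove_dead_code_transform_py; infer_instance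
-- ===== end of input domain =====

-- B replaces A's nested index-driven while loops by one flat pass carrying an
-- optional skipping-indent state (objective: simpler; same O(n) cost).

-- shared helpers: these exact expressions appear verbatim in both Pythons
def pvStrip (l : List Char) : List Char := PySem.Chars.strip l
def pvIndent (l : List Char) : Nat := l.length - (PySem.Chars.lstrip l).length
def pvIsTerm (s : List Char) : Bool :=
  PySem.Chars.startswith s "return ".toList || PySem.Chars.startswith s "return\n".toList ||
  PySem.Chars.startswith s "raise ".toList || PySem.Chars.startswith s "break".toList ||
  PySem.Chars.startswith s "continue".toList

-- ===== PORT A =====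
-- inner 'while j < len(lines)' loop: returns (blank lines kept, remaining suffix lines[j:])
def pvSkipA (indent : Nat) : List (List Char) → List (List Char) × List (List Char)
  | [] => ([], [])
  | l :: rest =>
    if (pvStrip l).isEmpty then
      let r := pvSkipA indent rest
      (l :: r.1, r.2)
    else if pvIndent l = indent then pvSkipA indent rest
    else ([], l :: rest)

-- termination lemma for the outer loop: the suffix pvSkipA returns is no longer than its input
theorem pvSkipA_len (indent : Nat) (xs : List (List Char)) :
    (pvSkipA indent xs).2.length ≤ xs.length := by
  induction xs with
  | nil => simp [pvSkipA]
  | cons l rest ih => simp only [pvSkipA]; split_ifs <;> simp <;> omega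

-- outer 'while i < len(lines)' loop over the suffix lines[i:]
def pvOuterA : List (List Char) → List (List Char)
  | [] => []
  | l :: rest =>
    if pvIsTerm (pvStrip l) then
      l :: ((pvSkipA (pvIndent l) rest).1 ++ pvOuterA (pvSkipA (pvIndent l) rest).2)
    else l :: pvOuterA rest
termination_by xs => xs.length
decreasing_by
  · have := pvSkipA_len (pvIndent l) rest; simp; omega
  · simp

def remove_dead_code_transform_py (source : String) : String :=
  String.ofList (PySem.Chars.join ['\n'] (pvOuterA (PySem.Chars.splitOn source.toList ['\n'])))

-- ===== PORT B =====
-- one fold step: (accumulated output, optional indent of the dead block being skipped)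
def pvStepB (st : List (List Char) × Option Nat) (l : List Char) : List (List Char) × Option Nat :=
  let stripped := pvStrip l
  match st.2 with
  | some ind =>
    if stripped.isEmpty then (st.1 ++ [l], some ind)
    else if pvIndent l = ind then st
    else (st.1 ++ [l], if pvIsTerm stripped then some (pvIndent l) else none)
  | none => (st.1 ++ [l], if pvIsTerm stripped then some (pvIndent l) else none)

def remove_dead_code_transform_py_alt (source : String) : String :=
  String.ofList (PySem.Chars.join ['\n']
    ((PySem.Chars.splitOn source.toList ['\n']).foldl pvStepB ([], none)).1)

-- ===== PRECONDITION & SPEC =====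
def Spec_remove_dead_code_transform_py (source : String) (out : String) : Prop := out = remove_dead_code_transform_py_alt source
instance (source : String) (out : String) : Decidable (Spec_remove_dead_code_transform_py source out) := by unfold Spec_remove_dead_code_transform_py; infer_instance

-- ===== CLAIM (what is proved, stated in full; the proofs are below) =====
def Claim_equal_remove_dead_code_transform_py : Prop := ∀ (source : String), Dom_remove_dead_code_transform_py source → Spec_remove_dead_code_transform_py source (remove_dead_code_transform_py source)

-- ===== LEMMAS AND PROOFS =====

-- B's fold without its accumulator: the output lines produced from a suffix in a given state
def pvG : List (List Char) → Option Nat → List (List Char)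
  | [], _ => []
  | l :: rest, some ind =>
    if (pvStrip l).isEmpty then l :: pvG rest (some ind)
    else if pvIndent l = ind then pvG rest (some ind)
    else l :: pvG rest (if pvIsTerm (pvStrip l) then some (pvIndent l) else none)
  | l :: rest, none => l :: pvG rest (if pvIsTerm (pvStrip l) then some (pvIndent l) else none)

theorem foldl_pvStepB (ls : List (List Char)) (acc : List (List Char)) (st : Option Nat) :
    (ls.foldl pvStepB (acc, st)).1 = acc ++ pvG ls st := by
  induction ls generalizing acc st with
  | nil => simp [pvG]
  | cons l rest ih =>
    cases st with
    | none => simp only [List.foldl, pvStepB, pvG]; simp [ih]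
    | some ind =>
      simp only [List.foldl, pvStepB, pvG]
      split_ifs <;> simp [ih]

theorem pvG_skip (xs : List (List Char)) (ind : Nat) :
    pvG xs (some ind) = (pvSkipA ind xs).1 ++ pvG (pvSkipA ind xs).2 none := by
  induction xs with
  | nil => simp [pvG, pvSkipA]
  | cons l rest ih =>
    by_cases h1 : (pvStrip l).isEmpty
    · simp only [pvG, pvSkipA, if_pos h1]; simp [ih]
    · by_cases h2 : pvIndent l = ind
      · simp only [pvG, pvSkipA, if_neg h1, if_pos h2]; simp [ih]
      · simp [pvG, pvSkipA, h1, h2]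

theorem pvOuterA_eq_pvG : ∀ (n : Nat) (xs : List (List Char)), xs.length ≤ n → pvOuterA xs = pvG xs none := by
  intro n
  induction n with
  | zero => intro xs h; cases xs with
    | nil => simp [pvOuterA, pvG]
    | cons l rest => simp at h
  | succ n ih =>
    intro xs h
    cases xs with
    | nil => simp [pvOuterA, pvG]
    | cons l rest =>
      rw [pvOuterA, pvG]
      by_cases ht : pvIsTerm (pvStrip l) = true
      · rw [if_pos ht, if_pos ht, pvG_skip]
        have hlen : (pvSkipA (pvIndent l) rest).2.length ≤ n := by
          have := pvSkipA_len (pvIndent l) rest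
          simp at h; omega
        rw [ih _ hlen]
      · rw [if_neg ht, if_neg ht]
        have : rest.length ≤ n := by simp at h; omega
        rw [ih _ this]

-- ===== VERDICT (by name: the statement is the Claim_ definition above) =====
theorem remove_dead_code_transform_py_spec : Claim_equal_remove_dead_code_transform_py := by
  intro source _
  unfold Spec_remove_dead_code_transform_py remove_dead_code_transform_py remove_dead_code_transform_py_alt
  rw [foldl_pvStepB, pvOuterA_eq_pvG (PySem.Chars.splitOn source.toList ['\n']).length _ le_rfl]
  simp
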